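-- pv_equiv track=rewrite | github.com/mayankwalia/DSA_using_Python | Codes/Week 1/LiveCoding/Question4.py | expanding
-- ===== SOURCE A (Python) =====
-- def expanding(L):
--     if len(L)>=2:
--         pdiff=abs(L[1]-L[0])
--     for i in range(1,len(L)-1):
--         diff=abs(L[i+1]-L[i])
--         if (diff-pdiff)<=0:
--             return False
--         pdiff=diff
--     return True
-- ===== SOURCE B (Python) =====
-- def expanding(L):
--     # strictly increasing <=> the list equals the sorted list of its distinct values
--     diffs = [abs(b - a) for a, b in zip(L, L[1:])]
--     return diffs == sorted(set(diffs))
-- ===== Notes on version B (the rewrite author's own statement) =====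
-- stated objective: alternative
-- what changed: Replaces A's fused one-pass scan carrying the previous difference with early return by a global characterization: build the list of consecutive absolute differences and test whether it equals the sorted list of its distinct values (strictly increasing iff sorted and duplicate-free).
import Mathlib
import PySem

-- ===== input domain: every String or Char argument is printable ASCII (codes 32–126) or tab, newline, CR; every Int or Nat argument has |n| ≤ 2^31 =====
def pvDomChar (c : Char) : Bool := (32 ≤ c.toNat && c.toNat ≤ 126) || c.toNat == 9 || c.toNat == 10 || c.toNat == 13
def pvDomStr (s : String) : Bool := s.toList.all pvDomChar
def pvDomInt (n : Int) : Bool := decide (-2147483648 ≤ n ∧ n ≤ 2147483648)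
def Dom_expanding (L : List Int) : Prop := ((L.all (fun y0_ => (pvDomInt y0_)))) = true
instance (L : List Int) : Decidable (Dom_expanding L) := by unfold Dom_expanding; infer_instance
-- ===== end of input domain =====

-- B replaces A's one-pass scan (previous-difference accumulator, early return) by a sort-based
-- characterization: the consecutive absolute differences strictly increase iff that list equals
-- the sorted list of its distinct values; alternative algorithm, not claimed faster.

-- ===== PORT A =====
-- the for-loop over range(1, len(L)-1), carrying pdiff, with early return False
def expandingGo (L : List Int) : List Int → Int → Bool
  | [], _ => true
  | i :: rest, pdiff =>
    let diff : Int := |((PySem.List.pyGet? L (i + 1)).getD 0) - ((PySem.List.pyGet? L i).getD 0)|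
    if diff - pdiff ≤ 0 then false
    else expandingGo L rest diff

def expanding (L : List Int) : Bool :=
  -- pdiff is only assigned when len(L) >= 2; the loop never reads it otherwise, so 0 is a harmless placeholder
  let pdiff : Int :=
    if 2 ≤ L.length then |((PySem.List.pyGet? L 1).getD 0) - ((PySem.List.pyGet? L 0).getD 0)| else 0
  expandingGo L (PySem.List.pyRange 1 ((L.length : Int) - 1) 1) pdiff

-- ===== PORT B =====
def expanding_alt (L : List Int) : Bool :=
  let diffs : List Int := List.zipWith (fun a b => |b - a|) L L.tail
  decide (diffs = PySem.List.sorted (PySem.Set.ofList diffs) (fun x => x) false)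

-- ===== PRECONDITION & SPEC =====
def Spec_expanding (L : List Int) (out : Bool) : Prop := out = expanding_alt L
instance (L : List Int) (out : Bool) : Decidable (Spec_expanding L out) := by unfold Spec_expanding; infer_instance

-- ===== CLAIM =====
def Claim_equal_expanding : Prop := ∀ (L : List Int), Dom_expanding L → Spec_expanding L (expanding L)

-- ===== LEMMAS AND PROOFS =====

-- reference chain: adjacent strict increase in A's loop shape
def chainB : Int → List Int → Bool
  | _, [] => true
  | p, d :: ds => if d - p ≤ 0 then false else chainB d ds

def diffsOf (L : List Int) : List Int := List.zipWith (fun a b => |b - a|) L L.tail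

lemma diffsOf_length (L : List Int) : (diffsOf L).length = L.length - 1 := by
  simp [diffsOf, List.length_zipWith, List.length_tail]

lemma diffsOf_getElem (L : List Int) (k : Nat) (h : k < (diffsOf L).length) :
    (diffsOf L)[k] = |((PySem.List.pyGet? L ((k : Int) + 1)).getD 0) - ((PySem.List.pyGet? L (k : Int)).getD 0)| := by
  have hk1 : k + 1 < L.length := by
    have := diffsOf_length L; omega
  have hk : k < L.length := by omega
  have htail : k < L.tail.length := by simp [List.length_tail]; omega
  have e1 : PySem.List.pyGet? L ((k : Int) + 1) = some L[k + 1] := by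
    rw [show ((k : Int) + 1) = ((k + 1 : Nat) : Int) by push_cast; ring,
      PySem.List.pyGet?_natCast, List.getElem?_eq_getElem hk1]
  have e0 : PySem.List.pyGet? L (k : Int) = some L[k] := by
    rw [PySem.List.pyGet?_natCast, List.getElem?_eq_getElem hk]
  simp [diffsOf, List.getElem_zipWith, List.getElem_tail, e1, e0]

-- A's loop from index k computes the chain over the remaining diffs
lemma go_eq_chain (L : List Int) (k : Nat) (p : Int) (hk : 1 ≤ k) :
    expandingGo L (PySem.List.pyRange (k : Int) ((L.length : Int) - 1) 1) p
      = chainB p ((diffsOf L).drop k) := by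
  by_cases hlt : (k : Int) < (L.length : Int) - 1
  · rw [PySem.List.pyRange_one_cons hlt]
    have hkd : k < (diffsOf L).length := by
      have := diffsOf_length L; omega
    rw [List.drop_eq_getElem_cons hkd]
    simp only [expandingGo]
    rw [← diffsOf_getElem L k hkd]
    by_cases hc : (diffsOf L)[k] - p ≤ 0
    · simp [chainB, hc]
    · simp only [chainB, if_neg hc]
      have := go_eq_chain L (k + 1) ((diffsOf L)[k]) (by omega)
      rw [show ((k : Int) + 1) = ((k + 1 : Nat) : Int) by push_cast; ring] at *
      simpa using this
  · have hr : PySem.List.pyRange (k : Int) ((L.length : Int) - 1) 1 = [] := by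
      rw [PySem.List.pyRange_one]
      have : ((L.length : Int) - 1 - (k : Int)).toNat = 0 := by omega
      simp [this]
    have hd : (diffsOf L).drop k = [] := by
      apply List.drop_eq_nil_of_le
      have := diffsOf_length L; omega
    simp [hr, hd, expandingGo, chainB]
termination_by L.length - k

-- chainB is the adjacent-chain condition
lemma chainB_iff (ds : List Int) (d : Int) :
    chainB d ds = true ↔ List.IsChain (fun a b => a < b) (d :: ds) := by
  induction ds generalizing d with
  | nil => simp [chainB, List.IsChain.singleton]
  | cons e es ih =>
    rw [List.isChain_cons_cons]
    simp only [chainB]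
    by_cases h : e - d ≤ 0
    · simp only [if_pos h]
      constructor
      · intro hF; cases hF
      · rintro ⟨hlt, -⟩; omega
    · simp only [if_neg h, ih]
      constructor
      · intro hc; exact ⟨by omega, hc⟩
      · rintro ⟨-, hc⟩; exact hc

-- A's value is the adjacent-chain condition on the diffs
lemma expanding_iff (L : List Int) :
    expanding L = true ↔ (diffsOf L).IsChain (fun a b => a < b) := by
  cases hL : diffsOf L with
  | nil =>
    have hlen : L.length ≤ 1 := by
      have := diffsOf_length L; rw [hL] at this; simp at this; omega
    have hr : PySem.List.pyRange 1 ((L.length : Int) - 1) 1 = [] := by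
      rw [PySem.List.pyRange_one]
      have : ((L.length : Int) - 1 - 1).toNat = 0 := by omega
      simp [this]
    simp [expanding, hr, expandingGo]
  | cons d ds =>
    have hlen : 2 ≤ L.length := by
      have := diffsOf_length L; rw [hL] at this; simp at this; omega
    have h0 : 0 < (diffsOf L).length := by rw [hL]; simp
    have hd0 : |((PySem.List.pyGet? L 1).getD 0) - ((PySem.List.pyGet? L 0).getD 0)| = d := by
      have hg := diffsOf_getElem L 0 h0
      norm_num at hg
      rw [← hg]
      simp [hL]
    have hdrop : (diffsOf L).drop 1 = ds := by rw [hL]; rfl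
    have hgo := go_eq_chain L 1 d (le_refl 1)
    simp only [Nat.cast_one] at hgo
    rw [hdrop] at hgo
    simp only [expanding, if_pos hlen]
    rw [hd0, hgo, chainB_iff]

-- B's value is "diffs is strictly increasing (pairwise)"
lemma alt_iff (L : List Int) :
    expanding_alt L = true ↔ (diffsOf L).Pairwise (fun a b => a < b) := by
  simp only [expanding_alt, decide_eq_true_iff]
  constructor
  · intro h
    rw [show List.zipWith (fun a b => |b - a|) L L.tail = diffsOf L from rfl] at h
    rw [h]
    exact PySem.List.sorted_ofList_pairwise_lt (diffsOf L)
  · intro hp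
    have hnd : (diffsOf L).Nodup := hp.imp (fun h => by omega)
    have hof : PySem.Set.ofList (diffsOf L) = diffsOf L :=
      PySem.Set.ofList_eq_self_of_nodup (diffsOf L) hnd
    rw [show List.zipWith (fun a b => |b - a|) L L.tail = diffsOf L from rfl, hof]
    exact (PySem.List.sorted_eq_self_of_pairwise (diffsOf L) (fun x => x)
      (hp.imp (fun h => le_of_lt h))).symm

-- ===== VERDICT =====
theorem expanding_spec : Claim_equal_expanding := by
  intro L _
  show expanding L = expanding_alt L
  rw [Bool.eq_iff_iff, expanding_iff, alt_iff]
  exact List.isChain_iff_pairwise
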